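-- pv_equiv track=rewrite | github.com/sj102300/Algorithm | 이진 탐색/2631.줄세우기.py | solution
-- ===== SOURCE A (Python) =====
-- def binary_search(answer, target):
--     left, right = 0, len(answer)-1
--
--     while left<=right:
--         mid = (left+right)//2
--         if answer[mid] == target:
--             return mid
--         elif answer[mid] < target:
--             left = mid + 1
--         else:
--             right = mid - 1
--
--     return left
--
-- def solution(n, arr):
--
--     answer = [arr[0]]
--     for i in range(1, len(arr)):
--         if answer[-1] < arr[i]:
--             answer.append(arr[i])
--         else:
--             targetIdx = binary_search(answer, arr[i])
--             answer[targetIdx] = arr[i]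
--
--     return n - len(answer)
-- ===== SOURCE B (Python) =====
-- def solution(n, arr):
--     # Quadratic DP over (value, length-of-LIS-ending-there) pairs instead of
--     # the patience-sorting tails array with binary search.
--     ends = []  # (element, length of longest strictly increasing run ending at it)
--     for x in arr:
--         best = 1
--         for v, l in ends:
--             if v < x and l + 1 > best:
--                 best = l + 1
--         ends.append((x, best))
--     return n - max(l for _, l in ends)
-- ===== Notes on version B (the rewrite author's own statement) =====
-- stated objective: simpler
-- what changed: Replaced the patience-sorting tails array maintained with a hand-written binary search by a plain quadratic DP over (value, LIS-length-ending-there) pairs, returning n minus the maximum.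
import Mathlib
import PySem

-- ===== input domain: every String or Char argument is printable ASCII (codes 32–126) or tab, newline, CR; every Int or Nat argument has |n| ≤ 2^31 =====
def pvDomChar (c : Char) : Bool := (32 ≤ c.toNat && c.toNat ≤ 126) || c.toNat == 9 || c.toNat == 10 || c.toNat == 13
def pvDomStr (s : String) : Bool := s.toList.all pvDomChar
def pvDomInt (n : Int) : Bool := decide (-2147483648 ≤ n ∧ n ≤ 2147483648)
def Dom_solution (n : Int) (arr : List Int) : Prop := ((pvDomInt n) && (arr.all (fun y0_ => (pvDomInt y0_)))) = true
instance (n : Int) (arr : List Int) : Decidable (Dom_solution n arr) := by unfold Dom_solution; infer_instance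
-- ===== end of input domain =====

-- B (quadratic DP over (value, LIS-length) pairs) replaces A's patience-sorting tails array
-- with binary search: a simpler, structurally different computation of n - LIS length.

-- ===== PORT A =====
-- binary_search(answer, target): the while loop becomes well-founded recursion on right+1-left.
-- answer[mid] is always in range at every call reached from `solution`; ported totally with pyGetD.
def pvBSearch (answer : List Int) (target : Int) (left right : Int) : Int :=
  if h : left ≤ right then
    let mid := PySem.Int.floordiv (left + right) 2
    let amid := PySem.List.pyGetD answer mid 0
    if amid = target then mid
    else if amid < target then pvBSearch answer target (mid + 1) right
    else pvBSearch answer target left (mid - 1)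
  else left
termination_by (right + 1 - left).toNat
decreasing_by
  all_goals
    have hb := PySem.Int.floordiv_two_mid_bounds h
    omega

-- body of A's for-loop over i (x = arr[i]); answer[-1] and answer[targetIdx] ported with pyGetD/pySetD
def pvStepA (answer : List Int) (x : Int) : List Int :=
  if PySem.List.pyGetD answer (-1) 0 < x then answer ++ [x]
  else PySem.List.pySetD answer (pvBSearch answer x 0 (PySem.List.len answer - 1)) x

def solution (n : Int) (arr : List Int) : Int :=
  match PySem.List.pyGet? arr 0 with
  | none => 0  -- arr[0] raises IndexError here (arr = []); excluded by Pre_solution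
  | some a0 =>
    n - ((PySem.List.pyRange 1 (PySem.List.len arr) 1).foldl
          (fun answer i => pvStepA answer (PySem.List.pyGetD arr i 0)) [a0]).length

-- ===== PORT B =====
-- best = inner for-loop of Source B over the (v, l) pairs collected so far
def pvBest (ends : List (Int × Int)) (x : Int) : Int :=
  ends.foldl (fun best e => if e.1 < x ∧ e.2 + 1 > best then e.2 + 1 else best) 1

def pvStepB (ends : List (Int × Int)) (x : Int) : List (Int × Int) :=
  ends ++ [(x, pvBest ends x)]

def solution_alt (n : Int) (arr : List Int) : Int :=
  let ends := arr.foldl pvStepB []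
  -- max(l for _, l in ends); raises ValueError on empty arr (excluded by Pre_solution)
  n - (PySem.List.max? (ends.map Prod.snd) (fun y => y)).getD 0

-- ===== PRECONDITION & SPEC =====
-- Pre_ excludes only the empty list, on which A raises IndexError (arr[0]).
def Pre_solution (n : Int) (arr : List Int) : Prop := arr ≠ []
instance (n : Int) (arr : List Int) : Decidable (Pre_solution n arr) := by
  unfold Pre_solution; infer_instance

def pvWitness_solution : Int × List Int := (3, [3, 1, 2])

def Spec_solution (n : Int) (arr : List Int) (out : Int) : Prop := out = solution_alt n arr
instance (n : Int) (arr : List Int) (out : Int) : Decidable (Spec_solution n arr out) := by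
  unfold Spec_solution; infer_instance

-- ===== CLAIM (what is proved, stated in full; the proofs are below) =====
def Claim_equal_solution : Prop := ∀ (n : Int) (arr : List Int), Dom_solution n arr → Pre_solution n arr → Spec_solution n arr (solution n arr)

-- ===== LEMMAS AND PROOFS =====

-- `pvIsEnd p k v`: p has a strictly increasing subsequence of length k whose last element is v
def pvIsEnd (p : List Int) (k : Nat) (v : Int) : Prop :=
  ∃ s : List Int, s.Sublist p ∧ s.Pairwise (· < ·) ∧ s.length = k ∧ s.getLast? = some v

theorem pv_mem_le_getLast {s : List Int} (hp : s.Pairwise (· < ·)) {w a : Int}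
    (hlast : s.getLast? = some w) (ha : a ∈ s) : a ≤ w := by
  have hne : s ≠ [] := by rintro rfl; simp at hlast
  have hw : s.getLast hne = w := by
    have := List.getLast?_eq_getLast (l := s) hne
    rw [this] at hlast; exact Option.some_injective _ hlast
  have hsplit : s.dropLast ++ [s.getLast hne] = s := List.dropLast_append_getLast hne
  rw [← hsplit] at ha hp
  rw [List.pairwise_append] at hp
  rcases List.mem_append.mp ha with h | h
  · exact le_of_lt (hw ▸ hp.2.2 a h _ (by simp))
  · simp at h; omega

theorem pvIsEnd_pos {p : List Int} {k : Nat} {v : Int} (h : pvIsEnd p k v) : 1 ≤ k := by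
  obtain ⟨s, _, _, hl, hlast⟩ := h
  cases s with
  | nil => simp at hlast
  | cons a t => simp at hl; omega

theorem pvIsEnd_mono {p : List Int} {x : Int} {k : Nat} {v : Int}
    (h : pvIsEnd p k v) : pvIsEnd (p ++ [x]) k v := by
  obtain ⟨s, hs, hc, hl, hlast⟩ := h
  exact ⟨s, hs.trans (List.sublist_append_left _ _), hc, hl, hlast⟩

theorem pvIsEnd_single (p : List Int) (x : Int) : pvIsEnd (p ++ [x]) 1 x :=
  ⟨[x], List.sublist_append_right p [x], by simp, by simp, by simp⟩

theorem pvIsEnd_extend {p : List Int} {x w : Int} {k : Nat}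
    (h : pvIsEnd p k w) (hw : w < x) : pvIsEnd (p ++ [x]) (k + 1) x := by
  obtain ⟨s, hs, hc, hl, hlast⟩ := h
  refine ⟨s ++ [x], hs.append (List.Sublist.refl _), ?_, by simp [hl], by simp⟩
  rw [List.pairwise_append]
  refine ⟨hc, by simp, ?_⟩
  intro a ha b hb
  simp at hb
  subst hb
  exact lt_of_le_of_lt (pv_mem_le_getLast hc hlast ha) hw

theorem pvIsEnd_decompose {p : List Int} {x v : Int} {k : Nat}
    (h : pvIsEnd (p ++ [x]) k v) :
    pvIsEnd p k v ∨ (v = x ∧ (k = 1 ∨ ∃ w, w < x ∧ pvIsEnd p (k - 1) w)) := by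
  obtain ⟨s, hs, hc, hl, hlast⟩ := h
  rw [List.sublist_append_iff] at hs
  obtain ⟨s1, s2, heq, hs1, hs2⟩ := hs
  subst heq
  rcases List.sublist_singleton.mp hs2 with h2 | h2
  · subst h2
    left
    exact ⟨s1, by simpa using hs1, by simpa using hc, by simpa using hl, by simpa using hlast⟩
  · subst h2
    right
    have hvx : v = x := by
      rw [List.getLast?_concat] at hlast
      exact (Option.some_injective _ hlast).symm
    refine ⟨hvx, ?_⟩
    rw [List.pairwise_append] at hc
    obtain ⟨hc1, _, hmid⟩ := hc
    cases hs1c : s1 with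
    | nil =>
      left; subst hs1c; simp at hl; omega
    | cons a t =>
      right
      subst hs1c
      have hw : (a :: t).getLast? = some ((a :: t).getLast (by simp)) :=
        List.getLast?_eq_getLast (l := a :: t) (by simp)
      refine ⟨(a :: t).getLast (by simp), hmid _ (List.getLast_mem _) x (by simp),
        ⟨a :: t, hs1, hc1, ?_, hw⟩⟩
      simp at hl ⊢
      omega

-- strict sortedness gives strictly monotone indexing (via getD)
theorem pv_sorted_getD {ans : List Int} (hs : ans.Pairwise (· < ·))
    {i j : Nat} (hij : i < j) (hj : j < ans.length) :
    ans.getD i 0 < ans.getD j 0 := by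
  rw [List.getD_eq_getElem ans 0 (by omega), List.getD_eq_getElem ans 0 hj]
  exact List.pairwise_iff_getElem.mp hs i j (by omega) hj hij

-- helper: pyGetD of an in-range nonnegative Int index is List.getD at toNat
theorem pv_pyGetD_toNat {ans : List Int} {i : Int} (h0 : 0 ≤ i) (h1 : i < ans.length) :
    PySem.List.pyGetD ans i 0 = ans.getD i.toNat 0 := by
  rw [PySem.List.pyGetD_eq_getElem ans 0 h0 h1, List.getD_eq_getElem ans 0 (by omega)]

theorem pvBSearch_spec_aux (ans : List Int) (x : Int) (hs : ans.Pairwise (· < ·)) :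
    ∀ (N : Nat) (left right : Int), (right + 1 - left).toNat ≤ N → 0 ≤ left →
    left ≤ ans.length → right < ans.length →
    (∀ i : Nat, (i : Int) < left → i < ans.length → ans.getD i 0 < x) →
    (∀ i : Nat, right < (i : Int) → i < ans.length → x ≤ ans.getD i 0) →
    0 ≤ pvBSearch ans x left right ∧ pvBSearch ans x left right ≤ ans.length ∧
    (∀ i : Nat, (i : Int) < pvBSearch ans x left right → i < ans.length → ans.getD i 0 < x) ∧
    (∀ i : Nat, pvBSearch ans x left right ≤ (i : Int) → i < ans.length → x ≤ ans.getD i 0) := by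
  intro N
  induction N with
  | zero =>
    intro left right hN hl hl2 hr hlo hhi
    have hcond : ¬ left ≤ right := by omega
    rw [pvBSearch, dif_neg hcond]
    exact ⟨hl, hl2, hlo, fun i hi hlen => hhi i (by omega) hlen⟩
  | succ N ih =>
    intro left right hN hl hl2 hr hlo hhi
    rw [pvBSearch]
    by_cases hcond : left ≤ right
    · rw [dif_pos hcond]
      have hmb := PySem.Int.floordiv_two_mid_bounds hcond
      set mid := PySem.Int.floordiv (left + right) 2 with hmiddef
      have hm0 : 0 ≤ mid := by omega
      have hm1 : mid < ans.length := by omega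
      have hamid : PySem.List.pyGetD ans mid 0 = ans.getD mid.toNat 0 := pv_pyGetD_toNat hm0 hm1
      simp only [hamid]
      by_cases h1 : ans.getD mid.toNat 0 = x
      · rw [if_pos h1]
        refine ⟨hm0, by omega, ?_, ?_⟩
        · intro i hi hlen
          have : ans.getD i 0 < ans.getD mid.toNat 0 := pv_sorted_getD hs (by omega) (by omega)
          omega
        · intro i hi hlen
          rcases Nat.lt_or_ge mid.toNat i with hlt | hge
          · have : ans.getD mid.toNat 0 < ans.getD i 0 := pv_sorted_getD hs hlt hlen
            omega
          · have : i = mid.toNat := by omega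
            subst this; omega
      · rw [if_neg h1]
        by_cases h2 : ans.getD mid.toNat 0 < x
        · rw [if_pos h2]
          refine ih (mid + 1) right (by omega) (by omega) (by omega) hr ?_ hhi
          intro i hi hlen
          rcases Nat.lt_or_ge i mid.toNat with hlt | hge
          · have : ans.getD i 0 < ans.getD mid.toNat 0 := pv_sorted_getD hs hlt (by omega)
            omega
          · have : i = mid.toNat := by omega
            subst this; omega
        · rw [if_neg h2]
          refine ih left (mid - 1) (by omega) hl hl2 (by omega) hlo ?_
          intro i hi hlen
          rcases Nat.lt_or_ge mid.toNat i with hlt | hge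
          · have : ans.getD mid.toNat 0 < ans.getD i 0 := pv_sorted_getD hs hlt hlen
            omega
          · have : i = mid.toNat := by omega
            subst this; omega
    · rw [dif_neg hcond]
      exact ⟨hl, hl2, hlo, fun i hi hlen => hhi i (by omega) hlen⟩

-- pvBSearch returns the lower-bound index of x in a strictly sorted list
theorem pvBSearch_spec (ans : List Int) (x : Int) (left right : Int)
    (hs : ans.Pairwise (· < ·)) (hl : 0 ≤ left) (hl2 : left ≤ ans.length) (hr : right < ans.length)
    (hlo : ∀ i : Nat, (i : Int) < left → i < ans.length → ans.getD i 0 < x)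
    (hhi : ∀ i : Nat, right < (i : Int) → i < ans.length → x ≤ ans.getD i 0) :
    0 ≤ pvBSearch ans x left right ∧ pvBSearch ans x left right ≤ ans.length ∧
    (∀ i : Nat, (i : Int) < pvBSearch ans x left right → i < ans.length → ans.getD i 0 < x) ∧
    (∀ i : Nat, pvBSearch ans x left right ≤ (i : Int) → i < ans.length → x ≤ ans.getD i 0) :=
  pvBSearch_spec_aux ans x hs _ left right le_rfl hl hl2 hr hlo hhi

-- combined invariant carried through both folds
def pvInv (p ans : List Int) (ends : List (Int × Int)) : Prop :=
  ans.Pairwise (· < ·) ∧ ans ≠ [] ∧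
  (∀ i : Nat, i < ans.length → pvIsEnd p (i + 1) (ans.getD i 0)) ∧
  (∀ (k : Nat) (v : Int), pvIsEnd p (k + 1) v → k < ans.length ∧ ans.getD k 0 ≤ v) ∧
  (∀ e ∈ ends, 1 ≤ e.2 ∧ pvIsEnd p e.2.toNat e.1) ∧
  (∀ (k : Nat) (v : Int), pvIsEnd p (k + 1) v → ∃ e ∈ ends, e.1 = v ∧ (k : Int) + 1 ≤ e.2)

-- getD after List.set
theorem pv_getD_set (ans : List Int) (j i : Nat) (x : Int) (hj : j < ans.length) :
    (ans.set j x).getD i 0 = if i = j then x else ans.getD i 0 := by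
  by_cases hi : i < ans.length
  · by_cases h : i = j
    · subst h
      rw [if_pos rfl, List.getD_eq_getElem _ 0 (by simpa using hi)]
      simp [List.getElem_set]
    · rw [if_neg h, List.getD_eq_getElem _ 0 (by simpa using hi), List.getElem_set,
          if_neg (by omega), List.getD_eq_getElem ans 0 hi]
  · rw [List.getD_eq_default _ 0 (by simpa using Nat.le_of_not_lt hi),
        List.getD_eq_default _ 0 (Nat.le_of_not_lt hi), if_neg (by omega)]

-- the inner for-loop of Source B: lower bound 1, dominates qualifying entries, and is attained
theorem pvBest_aux (x : Int) (ends : List (Int × Int)) : ∀ b : Int,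
    (b ≤ ends.foldl (fun best e => if e.1 < x ∧ e.2 + 1 > best then e.2 + 1 else best) b) ∧
    (∀ e ∈ ends, e.1 < x → e.2 + 1 ≤ ends.foldl (fun best e => if e.1 < x ∧ e.2 + 1 > best then e.2 + 1 else best) b) ∧
    (ends.foldl (fun best e => if e.1 < x ∧ e.2 + 1 > best then e.2 + 1 else best) b = b ∨
      ∃ e ∈ ends, e.1 < x ∧ ends.foldl (fun best e => if e.1 < x ∧ e.2 + 1 > best then e.2 + 1 else best) b = e.2 + 1) := by
  induction ends with
  | nil => intro b; exact ⟨le_rfl, by simp, Or.inl rfl⟩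
  | cons q t ih =>
    intro b
    simp only [List.foldl_cons]
    obtain ⟨ih1, ih2, ih3⟩ := ih (if q.1 < x ∧ q.2 + 1 > b then q.2 + 1 else b)
    refine ⟨le_trans (by split_ifs with h <;> omega) ih1, ?_, ?_⟩
    · intro e he hex
      rcases List.mem_cons.mp he with rfl | he
      · exact le_trans (by split_ifs with h <;> omega) ih1
      · exact ih2 e he hex
    · rcases ih3 with h | ⟨e, he, hex, heq⟩
      · by_cases hq : q.1 < x ∧ q.2 + 1 > b
        · exact Or.inr ⟨q, List.mem_cons_self, hq.1, by rw [h, if_pos hq]⟩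
        · exact Or.inl (by rw [h, if_neg hq])
      · exact Or.inr ⟨e, List.mem_cons_of_mem _ he, hex, heq⟩

theorem pvBest_ge_one (ends : List (Int × Int)) (x : Int) : 1 ≤ pvBest ends x :=
  (pvBest_aux x ends 1).1

theorem pvBest_ge {ends : List (Int × Int)} {x : Int} {e : Int × Int}
    (he : e ∈ ends) (hex : e.1 < x) : e.2 + 1 ≤ pvBest ends x :=
  (pvBest_aux x ends 1).2.1 e he hex

theorem pvBest_cases (ends : List (Int × Int)) (x : Int) :
    pvBest ends x = 1 ∨ ∃ e ∈ ends, e.1 < x ∧ pvBest ends x = e.2 + 1 :=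
  (pvBest_aux x ends 1).2.2

-- the B half of the invariant is preserved (it does not depend on A's branch)
theorem pvEndsStep {p : List Int} {ends : List (Int × Int)} (x : Int)
    (hB1 : ∀ e ∈ ends, 1 ≤ e.2 ∧ pvIsEnd p e.2.toNat e.1)
    (hB2 : ∀ (k : Nat) (v : Int), pvIsEnd p (k + 1) v → ∃ e ∈ ends, e.1 = v ∧ (k : Int) + 1 ≤ e.2) :
    (∀ e ∈ pvStepB ends x, 1 ≤ e.2 ∧ pvIsEnd (p ++ [x]) e.2.toNat e.1) ∧
    (∀ (k : Nat) (v : Int), pvIsEnd (p ++ [x]) (k + 1) v →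
      ∃ e ∈ pvStepB ends x, e.1 = v ∧ (k : Int) + 1 ≤ e.2) := by
  constructor
  · intro e he
    rcases List.mem_append.mp he with he | he
    · obtain ⟨h1, h2⟩ := hB1 e he
      exact ⟨h1, pvIsEnd_mono h2⟩
    · simp at he
      subst he
      refine ⟨pvBest_ge_one ends x, ?_⟩
      rcases pvBest_cases ends x with hb | ⟨e, he, hex, heq⟩
      · simp only [hb]
        exact pvIsEnd_single p x
      · obtain ⟨h1, h2⟩ := hB1 e he
        have := pvIsEnd_extend h2 hex
        simp only [heq]
        have harith : (e.2 + 1).toNat = e.2.toNat + 1 := by omega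
        rw [harith]
        exact this
  · intro k v hk
    rcases pvIsEnd_decompose hk with hold | ⟨hvx, hcase⟩
    · obtain ⟨e, he, h1, h2⟩ := hB2 k v hold
      exact ⟨e, List.mem_append_left _ he, h1, h2⟩
    · subst v
      rcases hcase with hk1 | ⟨w, hwx, hw⟩
      · have hk0 : k = 0 := by omega
        subst hk0
        exact ⟨(x, pvBest ends x), by simp [pvStepB], rfl, by
          simpa using pvBest_ge_one ends x⟩
      · have hkpos : 1 ≤ k := by
          have := pvIsEnd_pos hw
          omega
        obtain ⟨k', rfl⟩ : ∃ k', k = k' + 1 := ⟨k - 1, by omega⟩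
        simp only [Nat.add_sub_cancel] at hw
        obtain ⟨e, he, rfl, h2⟩ := hB2 k' w hw
        refine ⟨(x, pvBest ends x), by simp [pvStepB], rfl, ?_⟩
        have := pvBest_ge he hwx
        push_cast
        omega

theorem pvInv_step {p ans : List Int} {ends : List (Int × Int)} (x : Int)
    (h : pvInv p ans ends) : pvInv (p ++ [x]) (pvStepA ans x) (pvStepB ends x) := by
  obtain ⟨hp, hne, hA1, hA2, hB1, hB2⟩ := h
  obtain ⟨hBS1, hBS2⟩ := pvEndsStep x hB1 hB2
  have hL1 : 1 ≤ ans.length := List.length_pos_iff.mpr hne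
  have hlast : PySem.List.pyGetD ans (-1) 0 = ans.getD (ans.length - 1) 0 := by
    rw [PySem.List.pyGetD_neg_one ans 0 hne, List.getLast_eq_getElem,
        List.getD_eq_getElem ans 0 (by omega)]
  have hmemle : ∀ a ∈ ans, a ≤ ans.getD (ans.length - 1) 0 := by
    intro a ha
    refine pv_mem_le_getLast hp ?_ ha
    rw [List.getLast?_eq_getLast (l := ans) hne, List.getLast_eq_getElem,
        List.getD_eq_getElem ans 0 (by omega)]
  have hgetD_le : ∀ i : Nat, i < ans.length → ans.getD i 0 ≤ ans.getD (ans.length - 1) 0 := by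
    intro i hi
    exact hmemle _ (by rw [List.getD_eq_getElem ans 0 hi]; exact List.getElem_mem _)
  unfold pvStepA
  rw [hlast]
  by_cases hbr : ans.getD (ans.length - 1) 0 < x
  · -- append branch
    rw [if_pos hbr]
    have hgetD_app : ∀ i : Nat, (ans ++ [x]).getD i 0 = if i < ans.length then ans.getD i 0
        else if i = ans.length then x else 0 := by
      intro i
      by_cases hi : i < ans.length
      · rw [if_pos hi, List.getD_append _ _ _ _ hi]
      · rw [if_neg hi]
        by_cases hieq : i = ans.length
        · subst hieq
          simp
        · rw [if_neg hieq, List.getD_eq_default _ 0 (by simp; omega)]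
    refine ⟨?_, by simp, ?_, ?_, hBS1, hBS2⟩
    · rw [List.pairwise_append]
      exact ⟨hp, by simp, fun a ha b hb => by
        simp at hb; subst hb; exact lt_of_le_of_lt (hmemle a ha) hbr⟩
    · intro i hi
      simp only [List.length_append, List.length_singleton] at hi
      rw [hgetD_app]
      by_cases hil : i < ans.length
      · rw [if_pos hil]
        exact pvIsEnd_mono (hA1 i hil)
      · have hieq : i = ans.length := by omega
        rw [if_neg hil, if_pos hieq]
        subst hieq
        have := hA1 (ans.length - 1) (by omega)
        have hext := pvIsEnd_extend this hbr
        have : ans.length - 1 + 1 + 1 = ans.length + 1 := by omega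
        rwa [this] at hext
    · intro k v hk
      rcases pvIsEnd_decompose hk with hold | ⟨hvx, hcase⟩
      · obtain ⟨h1, h2⟩ := hA2 k v hold
        refine ⟨by simp only [List.length_append, List.length_singleton]; omega, ?_⟩
        rw [hgetD_app, if_pos h1]
        exact h2
      · subst v
        rcases hcase with hk1 | ⟨w, hwx, hw⟩
        · have hk0 : k = 0 := by omega
          subst hk0
          refine ⟨by simp only [List.length_append, List.length_singleton]; omega, ?_⟩
          rw [hgetD_app]
          by_cases h0 : 0 < ans.length
          · rw [if_pos h0]
            exact le_of_lt (lt_of_le_of_lt (hgetD_le 0 h0) hbr)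
          · omega
        · have hkpos : 1 ≤ k := by have := pvIsEnd_pos hw; omega
          obtain ⟨k', rfl⟩ : ∃ k', k = k' + 1 := ⟨k - 1, by omega⟩
          simp only [Nat.add_sub_cancel] at hw
          obtain ⟨h1, h2⟩ := hA2 k' w hw
          refine ⟨by simp only [List.length_append, List.length_singleton]; omega, ?_⟩
          rw [hgetD_app]
          by_cases hil : k' + 1 < ans.length
          · rw [if_pos hil]
            exact le_of_lt (lt_of_le_of_lt (hgetD_le (k' + 1) hil) hbr)
          · have : k' + 1 = ans.length := by omega
            rw [if_neg hil, if_pos this]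
  · -- binary-search-and-set branch
    rw [if_neg hbr]
    have hspec := pvBSearch_spec ans x 0 (PySem.List.len ans - 1) hp le_rfl
      (by positivity) (by simp only [PySem.List.len_eq]; omega) (by intro i hi _; omega)
      (by intro i hi hlen; simp at hi; omega)
    obtain ⟨hr0, hr1, hlo, hhi⟩ := hspec
    set idx := pvBSearch ans x 0 (PySem.List.len ans - 1) with hidxdef
    have hidxlt : idx < ans.length := by
      by_contra hcon
      have : ((ans.length - 1 : Nat) : Int) < idx := by omega
      have := hlo (ans.length - 1) this (by omega)
      omega
    have hxlej : x ≤ ans.getD idx.toNat 0 := hhi idx.toNat (by omega) (by omega)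
    rw [PySem.List.pySetD_of_nonneg ans x hr0]
    set j := idx.toNat with hjdef
    have hjlt : j < ans.length := by omega
    have hlo' : ∀ i : Nat, i < j → ans.getD i 0 < x := fun i hi => hlo i (by omega) (by omega)
    have hhi' : ∀ i : Nat, j ≤ i → i < ans.length → x ≤ ans.getD i 0 := fun i h1 h2 =>
      hhi i (by omega) h2
    have hgd := fun i => pv_getD_set ans j i x hjlt
    refine ⟨?_, by simp [List.set_eq_nil_iff] at *; omega, ?_, ?_, hBS1, hBS2⟩
    · rw [List.pairwise_iff_getElem]
      intro a b ha hb hab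
      simp only [List.length_set] at ha hb
      rw [← List.getD_eq_getElem _ 0, ← List.getD_eq_getElem _ 0, hgd a, hgd b]
      by_cases haj : a = j
      · subst haj
        rw [if_pos rfl, if_neg (by omega)]
        exact lt_of_le_of_lt hxlej (pv_sorted_getD hp hab hb)
      · rw [if_neg haj]
        by_cases hbj : b = j
        · subst hbj
          rw [if_pos rfl]
          exact hlo' a (by omega)
        · rw [if_neg hbj]
          exact pv_sorted_getD hp hab hb
    · intro i hi
      simp only [List.length_set] at hi
      rw [hgd i]
      by_cases hij : i = j
      · rw [if_pos hij]
        by_cases hi0 : i = 0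
        · subst hi0
          exact pvIsEnd_single p x
        · have := hA1 (i - 1) (by omega)
          have hext := pvIsEnd_extend this (hlo' (i - 1) (by omega))
          have harith : i - 1 + 1 + 1 = i + 1 := by omega
          rwa [harith] at hext
      · rw [if_neg hij]
        exact pvIsEnd_mono (hA1 i hi)
    · intro k v hk
      rcases pvIsEnd_decompose hk with hold | ⟨hvx, hcase⟩
      · obtain ⟨h1, h2⟩ := hA2 k v hold
        refine ⟨by simpa using h1, ?_⟩
        rw [hgd k]
        by_cases hkj : k = j
        · subst hkj
          rw [if_pos rfl]
          exact le_trans hxlej h2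
        · rw [if_neg hkj]
          exact h2
      · subst v
        rcases hcase with hk1 | ⟨w, hwx, hw⟩
        · have hk0 : k = 0 := by omega
          subst hk0
          refine ⟨by simpa using hjlt.trans_le' (Nat.zero_le j), ?_⟩
          rw [hgd 0]
          by_cases h0j : 0 = j
          · rw [if_pos h0j]
          · rw [if_neg h0j]
            exact le_of_lt (hlo' 0 (by omega))
        · have hkpos : 1 ≤ k := by have := pvIsEnd_pos hw; omega
          obtain ⟨k', rfl⟩ : ∃ k', k = k' + 1 := ⟨k - 1, by omega⟩
          simp only [Nat.add_sub_cancel] at hw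
          obtain ⟨h1, h2⟩ := hA2 k' w hw
          have hk'j : k' < j := by
            by_contra hcon
            have := hhi' k' (by omega) h1
            omega
          refine ⟨by simpa using hjlt.trans_le' (by omega), ?_⟩
          rw [hgd (k' + 1)]
          by_cases hkj : k' + 1 = j
          · rw [if_pos hkj]
          · rw [if_neg hkj]
            exact le_of_lt (hlo' (k' + 1) (by omega))

theorem pvInv_fold {rest p ans : List Int} {ends : List (Int × Int)}
    (h : pvInv p ans ends) :
    pvInv (p ++ rest) (rest.foldl pvStepA ans) (rest.foldl pvStepB ends) := by
  induction rest generalizing p ans ends with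
  | nil => simpa using h
  | cons y t ih =>
    have := ih (pvInv_step y h)
    simpa using this

theorem pvInv_base (a0 : Int) : pvInv [a0] [a0] [(a0, 1)] := by
  have hone : pvIsEnd [a0] 1 a0 := ⟨[a0], List.Sublist.refl _, by simp, by simp, by simp⟩
  have hinv : ∀ (k : Nat) (v : Int), pvIsEnd [a0] (k + 1) v → k = 0 ∧ v = a0 := by
    intro k v hk
    obtain ⟨s, hs, _, hl, hlast⟩ := hk
    rcases List.sublist_singleton.mp hs with rfl | rfl
    · simp at hlast
    · simp at hl hlast
      omega
  refine ⟨by simp, by simp, ?_, ?_, ?_, ?_⟩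
  · intro i hi
    simp only [List.length_singleton] at hi
    have : i = 0 := by omega
    subst this
    simpa using hone
  · intro k v hk
    obtain ⟨rfl, rfl⟩ := hinv k v hk
    simp
  · intro e he
    simp at he
    subst he
    exact ⟨le_rfl, hone⟩
  · intro k v hk
    obtain ⟨rfl, hva⟩ := hinv k v hk
    exact ⟨(a0, 1), by simp, hva.symm, by simp⟩

-- from the invariant: B's maximum dp value equals A's tails length
theorem pv_final {p ans : List Int} {ends : List (Int × Int)} (h : pvInv p ans ends) :
    (PySem.List.max? (ends.map Prod.snd) (fun y => y)).getD 0 = (ans.length : Int) := by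
  obtain ⟨hp, hne, hA1, hA2, hB1, hB2⟩ := h
  have hL1 : 1 ≤ ans.length := List.length_pos_iff.mpr hne
  have harith : ans.length - 1 + 1 = ans.length := by omega
  have hlis : pvIsEnd p ((ans.length - 1) + 1) (ans.getD (ans.length - 1) 0) :=
    hA1 (ans.length - 1) (by omega)
  obtain ⟨e0, he0, _, he0ge⟩ := hB2 (ans.length - 1) _ hlis
  cases hmax : PySem.List.max? (ends.map Prod.snd) (fun y => y) with
  | none =>
    rw [PySem.List.max?_eq_none_iff, List.map_eq_nil_iff] at hmax
    subst hmax
    simp at he0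
  | some m =>
    obtain ⟨e, he, hesnd⟩ := List.mem_map.mp (PySem.List.max?_mem hmax)
    obtain ⟨hge1, hise⟩ := hB1 e he
    have hsplit : e.2.toNat = (e.2.toNat - 1) + 1 := by omega
    rw [hsplit] at hise
    have hub := (hA2 (e.2.toNat - 1) e.1 hise).1
    have hmax_ge : e0.2 ≤ m := PySem.List.max?_isMax hmax e0.2 (List.mem_map_of_mem he0)
    simp only [Option.getD_some]
    omega

-- ===== VERDICT (by name: the statement is the Claim_ definition above) =====
theorem solution_spec : Claim_equal_solution := by
  intro n arr _ hpre
  cases arr with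
  | nil => exact absurd rfl hpre
  | cons a0 rest =>
    have hinv : pvInv (a0 :: rest) (rest.foldl pvStepA [a0]) (rest.foldl pvStepB [(a0, 1)]) := by
      have := pvInv_fold (rest := rest) (pvInv_base a0)
      simpa using this
    have e1 : solution n (a0 :: rest) = n - ((rest.foldl pvStepA [a0]).length : Int) := by
      unfold solution
      simp only [PySem.List.pyGet?_zero_cons]
      rw [PySem.List.foldl_pyRange_pyGetD (a0 :: rest) 0 pvStepA [a0] (by norm_num : (0 : Int) ≤ 1)]
      simp
    have e2 : solution_alt n (a0 :: rest) =
        n - (PySem.List.max? ((rest.foldl pvStepB [(a0, 1)]).map Prod.snd) (fun y => y)).getD 0 := by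
      unfold solution_alt
      rw [List.foldl_cons, show pvStepB [] a0 = [(a0, 1)] from rfl]
    unfold Spec_solution
    rw [e1, e2, pv_final hinv]
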